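-- pv_equiv track=rewrite | github.com/pypi-data/pypi-mirror-350 | packages/PreKO/preko-0.3.1-py3-none-any.whl/PreKO/InDel.py | _TrimRedundantSideAlignment
-- ===== SOURCE A (Python) =====
-- def _TrimRedundantSideAlignment(sRef_needle_ori, sQuery_needle_ori):
--
--     # detach forward ---, backward ---
--     # e.g.    ref   ------AAAGGCTACGATCTGCG------
--     #         query AAAAAAAAATCGCTCTCGCTCTCCGATCT
--     # trimmed ref         AAAGGCTACGATCTGCG
--     # trimmed qeury       AAATCGCTCTCGCTCTC
--     iReal_ref_needle_start = 0
--     iReal_ref_needle_end = len(sRef_needle_ori)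
--     iRef_needle_len = len(sRef_needle_ori)
--
--     for i, sRef_nucle in enumerate(sRef_needle_ori):
--         if sRef_nucle in ['A', 'C', 'G', 'T']:
--             iReal_ref_needle_start = i
--             break
--
--     for i, sRef_nucle in enumerate(sRef_needle_ori[::-1]):
--         if sRef_nucle in ['A', 'C', 'G', 'T']:
--             iReal_ref_needle_end = iRef_needle_len - (i + 1)
--             # forward 0 1 2  len : 3
--             # reverse 2 1 0,  len - (2 + 1) = 0
--             break
--
--     sRef_needle = sRef_needle_ori[iReal_ref_needle_start:iReal_ref_needle_end + 1]
--     if iReal_ref_needle_start: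
--         sQuery_needle = sQuery_needle_ori[:iReal_ref_needle_end]
--     sQuery_needle = sQuery_needle_ori[:len(sRef_needle)]
--     # detaching completion
--     return (sRef_needle, sQuery_needle)
-- ===== SOURCE B (Python) =====
-- def _TrimRedundantSideAlignment(sRef_needle_ori, sQuery_needle_ori):
--     # single forward pass tracking first and last real-nucleotide indices
--     first_real = None
--     last_real = None
--     for i, ch in enumerate(sRef_needle_ori):
--         if ch in "ACGT":
--             if first_real is None:
--                 first_real = i
--             last_real = i
--     start = 0 if first_real is None else first_real
--     end = len(sRef_needle_ori) if last_real is None else last_real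
--     sRef_needle = sRef_needle_ori[start:end + 1]
--     sQuery_needle = sQuery_needle_ori[:len(sRef_needle)]
--     return (sRef_needle, sQuery_needle)
-- ===== Notes on version B (the rewrite author's own statement) =====
-- stated objective: faster
-- what changed: Replaces A's two end-anchored break-loops (a forward scan plus a scan over a reversed copy s[::-1]) with one forward pass tracking first/last nucleotide indices, dropping the reversed-string copy, the per-char list construction and A's dead overwritten query assignment.
import Mathlib
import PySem

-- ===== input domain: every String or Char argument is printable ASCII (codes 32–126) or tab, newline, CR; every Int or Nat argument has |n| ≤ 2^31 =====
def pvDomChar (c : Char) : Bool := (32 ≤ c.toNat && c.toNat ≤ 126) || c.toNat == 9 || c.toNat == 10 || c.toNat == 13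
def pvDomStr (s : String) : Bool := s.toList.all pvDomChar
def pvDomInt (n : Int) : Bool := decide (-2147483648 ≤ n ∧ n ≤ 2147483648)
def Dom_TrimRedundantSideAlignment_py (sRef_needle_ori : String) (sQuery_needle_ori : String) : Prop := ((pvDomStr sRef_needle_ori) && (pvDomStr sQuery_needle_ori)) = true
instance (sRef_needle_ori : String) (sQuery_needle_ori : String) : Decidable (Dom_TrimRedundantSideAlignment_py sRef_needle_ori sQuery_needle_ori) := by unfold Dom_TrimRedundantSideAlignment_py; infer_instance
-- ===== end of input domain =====

-- B replaces A's two break-loops (forward + over the reversed string) by one forward pass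
-- tracking first/last nucleotide indices; return value only, no mutation in either program.

-- ===== PORT A =====

-- sRef_nucle in ['A', 'C', 'G', 'T']
def pvNuc (c : Char) : Bool := ['A', 'C', 'G', 'T'].contains c

-- "for i, c in enumerate(cs): if pvNuc c: <record i>; break" — first matching index, carrying the running index i
def pvAFirst : List Char → Int → Option Int
  | [], _ => none
  | c :: rest, i => if pvNuc c then some i else pvAFirst rest (i + 1)

def TrimRedundantSideAlignment_py (sRef_needle_ori : String) (sQuery_needle_ori : String) : String × String :=
  let lst := sRef_needle_ori.toList
  let iRef_needle_len : Int := PySem.List.len lst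
  -- first loop: iReal_ref_needle_start defaults to 0
  let iReal_ref_needle_start : Int := (pvAFirst lst 0).getD 0
  -- second loop over sRef_needle_ori[::-1]; default end = len
  let iReal_ref_needle_end : Int :=
    match pvAFirst ((PySem.List.slice? lst none none (-1)).getD []) 0 with
    | some i => iRef_needle_len - (i + 1)
    | none => iRef_needle_len
  let sRef_needle := PySem.List.slice lst (some iReal_ref_needle_start) (some (iReal_ref_needle_end + 1))
  -- "if iReal_ref_needle_start: sQuery_needle = sQuery_needle_ori[:iReal_ref_needle_end]" — dead, overwritten next line
  let _dead := PySem.List.slice sQuery_needle_ori.toList none (some iReal_ref_needle_end)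
  let sQuery_needle := PySem.List.slice sQuery_needle_ori.toList none (some (PySem.List.len sRef_needle))
  (String.ofList sRef_needle, String.ofList sQuery_needle)

-- ===== PORT B =====

-- one forward pass: state (first_real, last_real)
def pvBScan : List Char → Int → Option Int × Option Int → Option Int × Option Int
  | [], _, st => st
  | c :: rest, i, (f, l) =>
      pvBScan rest (i + 1) (if pvNuc c then ((if f = none then some i else f), some i) else (f, l))

def TrimRedundantSideAlignment_py_alt (sRef_needle_ori : String) (sQuery_needle_ori : String) : String × String :=
  let lst := sRef_needle_ori.toList
  let st := pvBScan lst 0 (none, none)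
  let start : Int := st.1.getD 0
  let stop : Int := st.2.getD (PySem.List.len lst)
  let sRef_needle := PySem.List.slice lst (some start) (some (stop + 1))
  let sQuery_needle := PySem.List.slice sQuery_needle_ori.toList none (some (PySem.List.len sRef_needle))
  (String.ofList sRef_needle, String.ofList sQuery_needle)

-- ===== PRECONDITION & SPEC =====
def Spec_TrimRedundantSideAlignment_py (sRef_needle_ori : String) (sQuery_needle_ori : String) (out : String × String) : Prop := out = TrimRedundantSideAlignment_py_alt sRef_needle_ori sQuery_needle_ori
instance (sRef_needle_ori : String) (sQuery_needle_ori : String) (out : String × String) : Decidable (Spec_TrimRedundantSideAlignment_py sRef_needle_ori sQuery_needle_ori out) := by unfold Spec_TrimRedundantSideAlignment_py; infer_instance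

-- ===== CLAIM (what is proved, stated in full; the proofs are below) =====
def Claim_equal_TrimRedundantSideAlignment_py : Prop := ∀ (sRef_needle_ori : String) (sQuery_needle_ori : String), Dom_TrimRedundantSideAlignment_py sRef_needle_ori sQuery_needle_ori → Spec_TrimRedundantSideAlignment_py sRef_needle_ori sQuery_needle_ori (TrimRedundantSideAlignment_py sRef_needle_ori sQuery_needle_ori)

-- ===== LEMMAS AND PROOFS =====

-- offset form of A's first-match scan
theorem pvAFirst_shift (l : List Char) (j : Int) :
    pvAFirst l j = (pvAFirst l 0).map (· + j) := by
  induction l generalizing j with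
  | nil => rfl
  | cons c rest ih =>
    by_cases h : pvNuc c
    · simp [pvAFirst, h]
    · simp only [pvAFirst, h, if_false, Bool.false_eq_true]
      rw [show (0:Int)+1 = 1 from rfl, ih (j + 1), ih 1, Option.map_map]
      cases pvAFirst rest 0 with
      | none => simp
      | some v => simp; ring

-- the first component of B's scan is A's forward scan (once set it never changes)
theorem pvBScan_fst (l : List Char) (i : Int) (f x : Option Int) :
    (pvBScan l i (f, x)).1 = match f with | some v => some v | none => pvAFirst l i := by
  induction l generalizing i f x with
  | nil => cases f <;> rfl
  | cons c rest ih =>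
    by_cases h : pvNuc c
    · cases f <;> simp [pvBScan, pvAFirst, h, ih]
    · cases f <;> simp [pvBScan, pvAFirst, h, ih]

-- B's scan over l ++ [c], from the right
theorem pvBScan_snoc (l : List Char) (c : Char) (i : Int) (st : Option Int × Option Int) :
    pvBScan (l ++ [c]) i st =
      if pvNuc c then
        ((if (pvBScan l i st).1 = none then some (i + (l.length : Int)) else (pvBScan l i st).1),
          some (i + (l.length : Int)))
      else pvBScan l i st := by
  induction l generalizing i st with
  | nil =>
    obtain ⟨f, x⟩ := st
    by_cases h : pvNuc c <;> simp [pvBScan, h]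
  | cons a rest ih =>
    obtain ⟨f, x⟩ := st
    simp only [List.cons_append, pvBScan, ih]
    have : i + 1 + (rest.length : Int) = i + ((a :: rest).length : Int) := by
      simp; ring
    rw [this]

-- the second component of B's scan is A's reversed scan, re-indexed
theorem pvBScan_snd (l : List Char) (i : Int) (st : Option Int × Option Int) :
    (pvBScan l i st).2 =
      match pvAFirst l.reverse 0 with
      | some k => some (i + ((l.length : Int) - (k + 1)))
      | none => st.2 := by
  induction l using List.reverseRecOn generalizing i st with
  | nil => rfl
  | append_singleton l c ih =>
    rw [pvBScan_snoc]
    by_cases h : pvNuc c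
    · simp only [h, if_true, List.reverse_append, List.reverse_singleton, List.singleton_append,
        pvAFirst, List.length_append, List.length_singleton]
      push_cast
      ring_nf
    · simp only [h, if_false, Bool.false_eq_true, ih, List.reverse_append, List.reverse_singleton,
        List.singleton_append, pvAFirst]
      rw [show (0:Int)+1 = 1 from rfl, pvAFirst_shift l.reverse 1]
      cases hk : pvAFirst l.reverse 0 with
      | none => simp
      | some k =>
        simp only [Option.map_some]
        have : i + ((l.length : Int) - (k + 1)) = i + (((l ++ [c]).length : Int) - (k + 1 + 1)) := by
          simp only [List.length_append, List.length_singleton]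
          push_cast
          ring
        rw [this]

-- ===== VERDICT (by name: the statement is the Claim_ definition above) =====
theorem TrimRedundantSideAlignment_py_spec : Claim_equal_TrimRedundantSideAlignment_py := by
  intro r q _
  unfold Spec_TrimRedundantSideAlignment_py TrimRedundantSideAlignment_py TrimRedundantSideAlignment_py_alt
  simp only [PySem.List.slice?_none_none_neg_one, Option.getD_some]
  rw [pvBScan_fst, pvBScan_snd]
  cases hf : pvAFirst r.toList 0 <;>
  cases hk : pvAFirst r.toList.reverse 0 <;>
  simp [PySem.List.len]
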